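-- pv_equiv track=rewrite | github.com/yquek/anticoncentration-investigation | anticoncentration_investigation.py | square_lattice
-- ===== SOURCE A (Python) =====
-- def square_lattice(nx, ny):
--     n = nx * ny
--     adj = [[] for _ in range(n)]
--     for x in range(nx):
--         for y in range(ny):
--             i = x * ny + y
--             if x + 1 < nx:
--                 j = (x + 1) * ny + y
--                 adj[i].append(j); adj[j].append(i)
--             if y + 1 < ny:
--                 j = x * ny + (y + 1)
--                 adj[i].append(j); adj[j].append(i)
--     return n, adj
-- ===== SOURCE B (Python) =====
-- def square_lattice(nx, ny):
--     n = nx * ny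
--     left  = ([i - ny] if i >= ny else [] for i in range(n))
--     up    = ([i - 1] if i % ny else [] for i in range(n))
--     right = ([i + ny] if i + ny < n else [] for i in range(n))
--     down  = ([i + 1] if (i + 1) % ny else [] for i in range(n))
--     return n, [l + u + r + d for l, u, r, d in zip(left, up, right, down)]
-- ===== Notes on version B (the rewrite author's own statement) =====
-- stated objective: alternative
-- what changed: Instead of nested (x,y) loops that mutate two lists per edge via symmetric double-appends, B is direction-major: it builds four whole-array passes (left/up/right/down candidate lists as comprehensions over the flat index with arithmetic bound tests) and zips them together by concatenation, with no mutation and no per-edge bookkeeping.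
-- outside the precondition, e.g. on square_lattice(-1, -1): A returns (1, [[]]), B returns (1, [[1, -1]])
import Mathlib
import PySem

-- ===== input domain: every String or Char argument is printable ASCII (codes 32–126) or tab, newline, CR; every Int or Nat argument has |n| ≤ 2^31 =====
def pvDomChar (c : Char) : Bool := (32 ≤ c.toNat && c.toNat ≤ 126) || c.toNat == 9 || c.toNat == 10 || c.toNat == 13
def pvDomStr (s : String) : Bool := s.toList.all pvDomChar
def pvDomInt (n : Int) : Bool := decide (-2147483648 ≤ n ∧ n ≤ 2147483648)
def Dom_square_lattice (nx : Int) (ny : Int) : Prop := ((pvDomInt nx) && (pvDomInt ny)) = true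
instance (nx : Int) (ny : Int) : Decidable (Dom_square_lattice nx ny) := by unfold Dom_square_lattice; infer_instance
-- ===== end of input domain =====

-- B is direction-major: four whole-array passes (left/up/right/down candidate lists over the flat
-- index, with arithmetic bound tests) zipped together by concatenation, instead of A's nested (x,y)
-- loops mutating two lists per edge (objective: alternative; same cost).

-- ===== PORT A =====
-- adj[i].append(j): in A the index i is always nonnegative and in range, so
-- List.modify at i.toNat is exact here.
def pvAppA (adj : List (List Int)) (i : Int) (j : Int) : List (List Int) :=
  adj.modify i.toNat (fun l => l ++ [j])

-- the body of A's inner loop, as a named helper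
def pvBodyA (nx : Int) (ny : Int) (adj : List (List Int)) (x : Int) (y : Int) : List (List Int) :=
  let i := x * ny + y
  let adj := if x + 1 < nx then
      let j := (x + 1) * ny + y
      pvAppA (pvAppA adj i j) j i
    else adj
  if y + 1 < ny then
      let j := x * ny + (y + 1)
      pvAppA (pvAppA adj i j) j i
  else adj

def square_lattice (nx : Int) (ny : Int) : Int × List (List Int) :=
  let n := nx * ny
  let adj0 : List (List Int) := (PySem.List.pyRange 0 n 1).map (fun _ => [])
  let adj := (PySem.List.pyRange 0 nx 1).foldl (fun adj x =>
    (PySem.List.pyRange 0 ny 1).foldl (fun adj y => pvBodyA nx ny adj x y) adj) adj0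
  (n, adj)

-- ===== PORT B =====
-- the four direction passes of Source B, then the zip-concatenation;
-- 'if i % ny' truthiness is 'mod i ny ≠ 0'
def square_lattice_alt (nx : Int) (ny : Int) : Int × List (List Int) :=
  let n := nx * ny
  let idxs := PySem.List.pyRange 0 n 1
  let left := idxs.map (fun i => if ny ≤ i then [i - ny] else [])
  let up := idxs.map (fun i => if PySem.Int.mod i ny ≠ 0 then [i - 1] else [])
  let right := idxs.map (fun i => if i + ny < n then [i + ny] else [])
  let down := idxs.map (fun i => if PySem.Int.mod (i + 1) ny ≠ 0 then [i + 1] else [])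
  (n, ((left.zip up).zip (right.zip down)).map (fun p => p.1.1 ++ p.1.2 ++ p.2.1 ++ p.2.2))

-- ===== PRECONDITION & SPEC =====
-- Pre_ restricts to the natural domain of lattice dimensions: it excludes the degenerate inputs
-- where BOTH dimensions are negative (so n = nx*ny is positive although both loops run zero times
-- and the lattice is empty); A returns n empty lists there and nothing is specified about B.
def Pre_square_lattice (nx : Int) (ny : Int) : Prop := 0 ≤ nx ∨ 0 ≤ ny
instance (nx : Int) (ny : Int) : Decidable (Pre_square_lattice nx ny) := by unfold Pre_square_lattice; infer_instance
def pvWitness_square_lattice : Int × Int := (3, 2)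

def Spec_square_lattice (nx : Int) (ny : Int) (out : Int × List (List Int)) : Prop := out = square_lattice_alt nx ny
instance (nx : Int) (ny : Int) (out : Int × List (List Int)) : Decidable (Spec_square_lattice nx ny out) := by unfold Spec_square_lattice; infer_instance

-- ===== CLAIM (what is proved, stated in full; the proofs are below) =====
def Claim_equal_square_lattice : Prop := ∀ (nx : Int) (ny : Int), Dom_square_lattice nx ny → Pre_square_lattice nx ny → Spec_square_lattice nx ny (square_lattice nx ny)

-- ===== LEMMAS AND PROOFS =====

-- the finished adjacency list of vertex (a,b): left, up, right, down neighbors that exist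
def cellFin (nx ny a b : ℕ) : List Int :=
  (if 0 < a then [((a : Int) - 1) * ny + b] else []) ++
  (if 0 < b then [(a : Int) * ny + ((b : Int) - 1)] else []) ++
  (if a + 1 < nx then [((a : Int) + 1) * ny + b] else []) ++
  (if b + 1 < ny then [(a : Int) * ny + ((b : Int) + 1)] else [])

-- A's intermediate state for vertex (a,b), just before A processes cell (x,y)
def cellMid (nx ny x y a b : ℕ) : List Int :=
  if a < x ∨ (a = x ∧ b < y) then cellFin nx ny a b
  else if a = x ∧ b = y then
    (if 0 < a then [((a : Int) - 1) * ny + b] else []) ++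
    (if 0 < b then [(a : Int) * ny + ((b : Int) - 1)] else [])
  else if a = x then (if 0 < a then [((a : Int) - 1) * ny + b] else [])
  else if a = x + 1 ∧ b < y then [((a : Int) - 1) * ny + b]
  else []

def stateA (nx ny x y : ℕ) : List (List Int) :=
  (List.range (nx * ny)).map (fun k => cellMid nx ny x y (k / ny) (k % ny))

-- generic loop invariant for foldl over List.range
theorem foldl_range_inv {α : Type} (f : α → ℕ → α) (S : ℕ → α) (n : ℕ)
    (h : ∀ k, k < n → f (S k) k = S (k + 1)) :
    (List.range n).foldl f (S 0) = S n := by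
  induction n with
  | zero => rfl
  | succ m ih =>
      rw [List.range_succ, List.foldl_append]
      rw [ih (fun k hk => h k (Nat.lt_succ_of_lt hk))]
      simpa using h m (Nat.lt_succ_self m)

theorem foldl_id {α β : Type} (a : α) (l : List β) :
    l.foldl (fun (acc : α) (_ : β) => acc) a = a := by
  induction l with
  | nil => rfl
  | cons x xs ih => simpa using ih

theorem idx_div_mod (NY x y : ℕ) (hy : y < NY) :
    (x * NY + y) / NY = x ∧ (x * NY + y) % NY = y := by
  constructor
  · rw [Nat.add_comm, Nat.add_mul_div_right _ _ (by omega : 0 < NY), Nat.div_eq_of_lt hy, Nat.zero_add]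
  · rw [Nat.add_comm, Nat.add_mul_mod_self_right, Nat.mod_eq_of_lt hy]

theorem modify_map_range {α : Type} (n i : ℕ) (g : ℕ → α) (f : α → α) :
    ((List.range n).map g).modify i f
      = (List.range n).map (fun k => if k = i then f (g k) else g k) := by
  apply List.ext_getElem
  · simp
  · intro k h1 h2
    rw [List.getElem_modify]
    simp only [List.getElem_map, List.getElem_range]
    by_cases h : k = i
    · simp [h]
    · simp only [if_neg h, if_neg (fun hh => h (Eq.symm hh))]

theorem cellMid_untouched (NX NY x y a b : ℕ) (hb : b < NY)
    (h1 : ¬(a = x ∧ b = y)) (h2 : ¬(a = x + 1 ∧ b = y)) (h3 : ¬(a = x ∧ b = y + 1)) :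
    cellMid NX NY x y a b = cellMid NX NY x (y + 1) a b := by
  unfold cellMid
  split_ifs <;> first | rfl | omega | (exfalso; omega)

set_option maxHeartbeats 2000000 in
theorem innerStepA (NX NY x y : ℕ) (hx : x < NX) (hy : y < NY) :
    pvBodyA NX NY (stateA NX NY x y) x y = stateA NX NY x (y + 1) := by
  have hI : (((x : Int)) * NY + y).toNat = x * NY + y := by
    rw [show ((x : Int)) * NY + y = ((x * NY + y : ℕ) : Int) by push_cast; ring, Int.toNat_natCast]
  have hJ1 : ((((x : Int)) + 1) * NY + y).toNat = (x + 1) * NY + y := by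
    rw [show (((x : Int)) + 1) * NY + y = (((x + 1) * NY + y : ℕ) : Int) by push_cast; ring,
      Int.toNat_natCast]
  have hJ2 : (((x : Int)) * NY + (y + 1)).toNat = x * NY + (y + 1) := by
    rw [show ((x : Int)) * NY + (y + 1) = ((x * NY + (y + 1) : ℕ) : Int) by push_cast; ring,
      Int.toNat_natCast]
  unfold pvBodyA pvAppA stateA
  dsimp only
  rw [hI, hJ1, hJ2]
  by_cases hX : x + 1 < NX <;> by_cases hY : y + 1 < NY
  · rw [if_pos (show ((x : Int)) + 1 < (NX : Int) by exact_mod_cast hX),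
      if_pos (show ((y : Int)) + 1 < (NY : Int) by exact_mod_cast hY),
      modify_map_range, modify_map_range, modify_map_range, modify_map_range]
    apply List.map_congr_left
    intro k hk
    simp only [List.mem_range] at hk
    have hra : NY * (k / NY) + k % NY = k := Nat.div_add_mod k NY
    have hbb : k % NY < NY := Nat.mod_lt _ (by omega)
    by_cases hkI : k = x * NY + y
    · subst hkI
      obtain ⟨hd, hm⟩ := idx_div_mod NY x y hy
      rw [hd, hm]
      have c1 : ¬(x * NY + y = x * NY + (y + 1)) := by omega
      have c2 : ¬(x * NY + y = (x + 1) * NY + y) := by simp only [add_one_mul]; omega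
      simp only [if_neg c1, if_neg c2]
      unfold cellMid cellFin
      split_ifs <;>
        first
          | rfl
          | (exfalso; omega)
          | (push_cast; simp)
          | (simp only [List.nil_append, List.append_assoc]; push_cast; ring_nf)
    · by_cases hkJ1 : k = (x + 1) * NY + y
      · subst hkJ1
        obtain ⟨hd, hm⟩ := idx_div_mod NY (x + 1) y hy
        rw [hd, hm]
        have c1 : ¬((x + 1) * NY + y = x * NY + (y + 1)) := by simp only [add_one_mul]; omega
        have c2 : ¬((x + 1) * NY + y = x * NY + y) := by simp only [add_one_mul]; omega
        simp only [if_neg c1, if_neg c2]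
        unfold cellMid cellFin
        split_ifs <;>
          first
            | rfl
            | (exfalso; omega)
            | (push_cast; simp)
            | (simp only [List.nil_append, List.append_assoc]; push_cast; ring_nf)
      · by_cases hkJ2 : k = x * NY + (y + 1)
        · subst hkJ2
          obtain ⟨hd, hm⟩ := idx_div_mod NY x (y + 1) hY
          rw [hd, hm]
          have c1 : ¬(x * NY + (y + 1) = x * NY + y) := by omega
          have c2 : ¬(x * NY + (y + 1) = (x + 1) * NY + y) := by simp only [add_one_mul]; omega
          simp only [if_neg c1, if_neg c2]
          unfold cellMid cellFin
          split_ifs <;>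
            first
              | rfl
              | (exfalso; omega)
              | (push_cast; simp)
              | (simp only [List.nil_append, List.append_assoc]; push_cast; ring_nf)
        · rw [if_neg hkJ2, if_neg hkI, if_neg hkJ1, if_neg hkI]
          apply cellMid_untouched NX NY x y _ _ hbb
          · rintro ⟨h1, h2⟩; exact hkI (by rw [← hra, h1, h2, Nat.mul_comm])
          · rintro ⟨h1, h2⟩; exact hkJ1 (by rw [← hra, h1, h2, Nat.mul_comm])
          · rintro ⟨h1, h2⟩; exact hkJ2 (by rw [← hra, h1, h2, Nat.mul_comm])
  · rw [if_pos (show ((x : Int)) + 1 < (NX : Int) by exact_mod_cast hX),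
      if_neg (show ¬(((y : Int)) + 1 < (NY : Int)) by exact_mod_cast hY),
      modify_map_range, modify_map_range]
    apply List.map_congr_left
    intro k hk
    simp only [List.mem_range] at hk
    have hra : NY * (k / NY) + k % NY = k := Nat.div_add_mod k NY
    have hbb : k % NY < NY := Nat.mod_lt _ (by omega)
    by_cases hkI : k = x * NY + y
    · subst hkI
      obtain ⟨hd, hm⟩ := idx_div_mod NY x y hy
      rw [hd, hm]
      have c2 : ¬(x * NY + y = (x + 1) * NY + y) := by simp only [add_one_mul]; omega
      simp only [if_neg c2]
      unfold cellMid cellFin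
      split_ifs <;>
        first
            | rfl
            | (exfalso; omega)
            | (push_cast; simp)
            | (simp only [List.nil_append, List.append_assoc]; push_cast; ring_nf)
    · by_cases hkJ1 : k = (x + 1) * NY + y
      · subst hkJ1
        obtain ⟨hd, hm⟩ := idx_div_mod NY (x + 1) y hy
        rw [hd, hm]
        have c2 : ¬((x + 1) * NY + y = x * NY + y) := by simp only [add_one_mul]; omega
        simp only [if_neg c2]
        unfold cellMid cellFin
        split_ifs <;>
          first
            | rfl
            | (exfalso; omega)
            | (push_cast; simp)
            | (simp only [List.nil_append, List.append_assoc]; push_cast; ring_nf)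
      · rw [if_neg hkJ1, if_neg hkI]
        apply cellMid_untouched NX NY x y _ _ hbb
        · rintro ⟨h1, h2⟩; exact hkI (by rw [← hra, h1, h2, Nat.mul_comm])
        · rintro ⟨h1, h2⟩; exact hkJ1 (by rw [← hra, h1, h2, Nat.mul_comm])
        · rintro ⟨h1, h2⟩; omega
  · rw [if_neg (show ¬(((x : Int)) + 1 < (NX : Int)) by exact_mod_cast hX),
      if_pos (show ((y : Int)) + 1 < (NY : Int) by exact_mod_cast hY),
      modify_map_range, modify_map_range]
    apply List.map_congr_left
    intro k hk
    simp only [List.mem_range] at hk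
    have hra : NY * (k / NY) + k % NY = k := Nat.div_add_mod k NY
    have hbb : k % NY < NY := Nat.mod_lt _ (by omega)
    have hdx : k / NY < NX := Nat.div_lt_of_lt_mul (by rw [Nat.mul_comm]; exact hk)
    by_cases hkI : k = x * NY + y
    · subst hkI
      obtain ⟨hd, hm⟩ := idx_div_mod NY x y hy
      rw [hd, hm]
      have c1 : ¬(x * NY + y = x * NY + (y + 1)) := by omega
      simp only [if_neg c1]
      unfold cellMid cellFin
      split_ifs <;>
        first
            | rfl
            | (exfalso; omega)
            | (push_cast; simp)
            | (simp only [List.nil_append, List.append_assoc]; push_cast; ring_nf)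
    · by_cases hkJ2 : k = x * NY + (y + 1)
      · subst hkJ2
        obtain ⟨hd, hm⟩ := idx_div_mod NY x (y + 1) hY
        rw [hd, hm]
        have c1 : ¬(x * NY + (y + 1) = x * NY + y) := by omega
        simp only [if_neg c1]
        unfold cellMid cellFin
        split_ifs <;>
          first
            | rfl
            | (exfalso; omega)
            | (push_cast; simp)
            | (simp only [List.nil_append, List.append_assoc]; push_cast; ring_nf)
      · rw [if_neg hkJ2, if_neg hkI]
        apply cellMid_untouched NX NY x y _ _ hbb
        · rintro ⟨h1, h2⟩; exact hkI (by rw [← hra, h1, h2, Nat.mul_comm])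
        · rintro ⟨h1, h2⟩; omega
        · rintro ⟨h1, h2⟩; exact hkJ2 (by rw [← hra, h1, h2, Nat.mul_comm])
  · rw [if_neg (show ¬(((x : Int)) + 1 < (NX : Int)) by exact_mod_cast hX),
      if_neg (show ¬(((y : Int)) + 1 < (NY : Int)) by exact_mod_cast hY)]
    apply List.map_congr_left
    intro k hk
    simp only [List.mem_range] at hk
    have hra : NY * (k / NY) + k % NY = k := Nat.div_add_mod k NY
    have hbb : k % NY < NY := Nat.mod_lt _ (by omega)
    have hdx : k / NY < NX := Nat.div_lt_of_lt_mul (by rw [Nat.mul_comm]; exact hk)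
    by_cases hkI : k = x * NY + y
    · subst hkI
      obtain ⟨hd, hm⟩ := idx_div_mod NY x y hy
      rw [hd, hm]
      unfold cellMid cellFin
      split_ifs <;>
        first
            | rfl
            | (exfalso; omega)
            | (push_cast; simp)
            | (simp only [List.nil_append, List.append_assoc]; push_cast; ring_nf)
    · apply cellMid_untouched NX NY x y _ _ hbb
      · rintro ⟨h1, h2⟩; exact hkI (by rw [← hra, h1, h2, Nat.mul_comm])
      · rintro ⟨h1, h2⟩; omega
      · rintro ⟨h1, h2⟩; omega

theorem rowWrapA (NX NY x : ℕ) (hy : 0 < NY) :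
    stateA NX NY x NY = stateA NX NY (x + 1) 0 := by
  unfold stateA
  apply List.map_congr_left
  intro k hk
  have hb : k % NY < NY := Nat.mod_lt _ hy
  unfold cellMid cellFin
  generalize k / NY = a
  generalize k % NY = b at hb ⊢
  split_ifs <;> first | rfl | omega | (exfalso; omega)

theorem stateA_final (NX NY : ℕ) (hy : 0 < NY) :
    stateA NX NY NX 0 = (List.range (NX * NY)).map (fun k => cellFin NX NY (k / NY) (k % NY)) := by
  unfold stateA
  apply List.map_congr_left
  intro k hk
  simp only [List.mem_range] at hk
  have ha : k / NY < NX := Nat.div_lt_of_lt_mul (by rw [Nat.mul_comm]; exact hk)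
  unfold cellMid
  rw [if_pos (Or.inl ha)]

theorem stateA_init (NX NY : ℕ) (hy : 0 < NY) :
    stateA NX NY 0 0 = (List.range (NX * NY)).map (fun _ => ([] : List Int)) := by
  unfold stateA
  apply List.map_congr_left
  intro k hk
  unfold cellMid cellFin
  generalize k / NY = a
  generalize k % NY = b
  split_ifs <;> first | rfl | omega | (exfalso; omega)

-- B's per-index closed cell: the four direction passes at flat index k concatenate to cellFin
theorem altCell (NX NY k : ℕ) (hNY : 0 < NY) (hk : k < NX * NY) :
    ((if (NY : Int) ≤ (k : Int) then [(k : Int) - NY] else []) ++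
     (if PySem.Int.mod (k : Int) NY ≠ 0 then [(k : Int) - 1] else []) ++
     (if (k : Int) + NY < (NX : Int) * (NY : Int) then [(k : Int) + NY] else []) ++
     (if PySem.Int.mod ((k : Int) + 1) NY ≠ 0 then [(k : Int) + 1] else []))
    = cellFin NX NY (k / NY) (k % NY) := by
  have hra : NY * (k / NY) + k % NY = k := Nat.div_add_mod k NY
  have hbb : k % NY < NY := Nat.mod_lt _ hNY
  generalize ha : k / NY = a at hra
  generalize hb : k % NY = b at hra hbb
  have hNYi : (0 : Int) < (NY : Int) := by exact_mod_cast hNY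
  have m1 : PySem.Int.mod (k : Int) NY = ((b : ℕ) : Int) := by
    rw [PySem.Int.mod_eq_emod_of_pos hNYi]
    rw [show ((k : Int)) = ((k : ℕ) : Int) from rfl]
    rw [show ((k : Int) % (NY : Int)) = (((k % NY : ℕ)) : Int) by exact_mod_cast rfl]
    rw [hb]
  have m2 : PySem.Int.mod ((k : Int) + 1) NY = (((b + 1) % NY : ℕ) : Int) := by
    rw [PySem.Int.mod_eq_emod_of_pos hNYi]
    rw [show ((k : Int) + 1) = (((k + 1 : ℕ)) : Int) by push_cast; ring]
    rw [show ((((k + 1 : ℕ)) : Int) % (NY : Int)) = (((k + 1) % NY : ℕ) : Int) by exact_mod_cast rfl]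
    congr 1
    rw [show k + 1 = NY * a + (b + 1) by omega, Nat.mul_add_mod]
  have s1 : ((NY : Int) ≤ (k : Int)) ↔ 0 < a := by
    constructor
    · intro hle
      have hle' : NY ≤ k := by exact_mod_cast hle
      rcases Nat.eq_zero_or_pos a with h | h
      · subst h; simp at hra; omega
      · exact h
    · intro h0
      have h1 : NY ≤ NY * a := Nat.le_mul_of_pos_right NY h0
      have : NY ≤ k := by omega
      exact_mod_cast this
  have s2 : (PySem.Int.mod (k : Int) NY ≠ 0) ↔ 0 < b := by
    rw [m1]; constructor
    · intro h; by_contra h0; apply h; simp [show b = 0 by omega]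
    · intro h h2
      have hb0 : b = 0 := by exact_mod_cast h2
      omega
  have s3 : ((k : Int) + NY < (NX : Int) * (NY : Int)) ↔ a + 1 < NX := by
    rw [show ((NX : Int) * (NY : Int)) = (((NX * NY : ℕ)) : Int) by push_cast; ring]
    constructor
    · intro h
      have h' : k + NY < NX * NY := by exact_mod_cast h
      by_contra h2
      have h3 : NX * NY ≤ (a + 1) * NY := Nat.mul_le_mul_right NY (by omega)
      have h4 : (a + 1) * NY = NY * a + NY := by ring
      omega
    · intro h
      have h2 : (a + 2) * NY ≤ NX * NY := Nat.mul_le_mul_right NY (by omega)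
      have h3 : (a + 2) * NY = NY * a + NY + NY := by ring
      have : k + NY < NX * NY := by omega
      exact_mod_cast this
  have s4 : (PySem.Int.mod ((k : Int) + 1) NY ≠ 0) ↔ b + 1 < NY := by
    rw [m2]; constructor
    · intro h
      by_contra h0
      apply h
      rw [show b + 1 = NY by omega, Nat.mod_self]
      rfl
    · intro h h2
      rw [Nat.mod_eq_of_lt h] at h2
      have : b + 1 = 0 := by exact_mod_cast h2
      omega
  simp only [s1, s2, s3, s4]
  unfold cellFin
  have hk' : (k : Int) = NY * a + b := by exact_mod_cast hra.symm
  split_ifs <;>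
    simp only [List.append_assoc, List.nil_append, List.append_nil] <;>
    first
      | rfl
      | (congr 1 <;> first | (rw [hk']; push_cast; ring) | skip)
      | (rw [hk']; push_cast; ring_nf)
      | (congr 1 <;> (try congr 1) <;> (try rw [hk']) <;> push_cast <;> ring)

-- ===== VERDICT (by name: the statement is the Claim_ definition above) =====
theorem square_lattice_spec : Claim_equal_square_lattice := by
  intro nx ny _ hpre
  unfold Spec_square_lattice square_lattice square_lattice_alt
  dsimp only
  by_cases hx : 0 < nx
  · by_cases hyy : 0 < ny
    · obtain ⟨NX, rfl⟩ : ∃ n : ℕ, nx = ↑n := ⟨nx.toNat, (Int.toNat_of_nonneg (by omega)).symm⟩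
      obtain ⟨NY, rfl⟩ : ∃ n : ℕ, ny = ↑n := ⟨ny.toNat, (Int.toNat_of_nonneg (by omega)).symm⟩
      have hNX : 0 < NX := by exact_mod_cast hx
      have hNY : 0 < NY := by exact_mod_cast hyy
      rw [show ((NX : Int)) * (NY : Int) = ((NX * NY : ℕ) : Int) by push_cast; ring]
      simp only [PySem.List.pyRange_zero_natCast, List.foldl_map, List.map_map,
        List.zip_map', List.map_map]
      have eInit : (List.range (NX * NY)).map
          ((fun _ => ([] : List Int)) ∘ (fun k : ℕ => (k : Int)))
          = (List.range (NX * NY)).map (fun _ => ([] : List Int)) := rfl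
      rw [eInit]
      have hA : (List.range NX).foldl
          (fun adj (x : ℕ) => (List.range NY).foldl
            (fun adj (y : ℕ) => pvBodyA (NX : Int) (NY : Int) adj (↑x) (↑y)) adj)
          ((List.range (NX * NY)).map (fun _ => ([] : List Int)))
          = (List.range (NX * NY)).map (fun k => cellFin NX NY (k / NY) (k % NY)) := by
        rw [← stateA_final NX NY hNY, ← stateA_init NX NY hNY]
        apply foldl_range_inv _ (fun x => stateA NX NY x 0) NX
        intro xx hxx
        rw [← rowWrapA NX NY xx hNY]
        apply foldl_range_inv (fun adj (yy : ℕ) => pvBodyA (NX : Int) (NY : Int) adj (↑xx) (↑yy))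
          (fun yy => stateA NX NY xx yy) NY
        intro yy hyy
        exact innerStepA NX NY xx yy hxx hyy
      rw [hA]
      refine congrArg _ (Eq.symm ?_)
      rw [show ((NX * NY : ℕ) : Int) = (NX : Int) * (NY : Int) by push_cast; ring]
      apply List.map_congr_left
      intro k hk
      simp only [List.mem_range] at hk
      simpa using altCell NX NY k hNY hk
    · -- ny ≤ 0: n ≤ 0, both sides are (n, [])
      have hn : nx * ny ≤ 0 := mul_nonpos_of_nonneg_of_nonpos (by omega) (by omega)
      simp only [PySem.List.pyRange_one_eq_nil hn, PySem.List.pyRange_one_eq_nil (by omega : ny ≤ 0),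
        List.map_nil, List.foldl_nil, List.zip_nil_right, List.zip_nil_left]
      rw [foldl_id]
  · -- nx ≤ 0: with Pre_, n ≤ 0 and both sides are (n, [])
    have hn : nx * ny ≤ 0 := by
      rcases hpre with h | h
      · have : nx = 0 := by omega
        simp [this]
      · exact mul_nonpos_of_nonpos_of_nonneg (by omega) h
    simp only [PySem.List.pyRange_one_eq_nil hn, PySem.List.pyRange_one_eq_nil (by omega : nx ≤ 0),
      List.map_nil, List.foldl_nil, List.zip_nil_right, List.zip_nil_left]
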